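-- pv_equiv track=rewrite | github.com/SeanKimCC/testing | time.py | ExponentialTime
-- ===== SOURCE A (Python) =====
-- def ExponentialTime(password):
--     N = len(password)
--     for i in range(0,10):
--         for j in range(0,10):
--             for k in range(0,10):
--                 for l in range(0,10):
--                     if([i,j,k,l] == password):
--                         return True
--
--     return False
-- ===== SOURCE B (Python) =====
-- def ExponentialTime(password):
--     return len(password) == 4 and all(0 <= d <= 9 for d in password)
-- ===== Notes on version B (the rewrite author's own statement) =====
-- stated objective: simpler
-- what changed: Replaced the brute-force enumeration of all 10^4 digit quadruples with a direct check that the list has length 4 and every element is a digit 0-9.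
import Mathlib
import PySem

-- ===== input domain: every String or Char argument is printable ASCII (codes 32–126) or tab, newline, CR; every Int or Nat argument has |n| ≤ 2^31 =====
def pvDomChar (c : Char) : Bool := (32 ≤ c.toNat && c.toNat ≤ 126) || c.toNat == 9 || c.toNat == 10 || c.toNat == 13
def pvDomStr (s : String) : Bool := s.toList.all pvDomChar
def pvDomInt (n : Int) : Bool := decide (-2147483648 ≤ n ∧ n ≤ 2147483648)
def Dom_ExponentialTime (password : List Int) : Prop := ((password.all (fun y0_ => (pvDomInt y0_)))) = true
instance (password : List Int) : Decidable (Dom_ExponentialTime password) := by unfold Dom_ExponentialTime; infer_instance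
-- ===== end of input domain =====

-- B replaces A's enumeration of all 10^4 digit quadruples by a direct length-and-digit check (objective: simpler).

-- ===== PORT A =====
-- literal port of A's four nested range(0,10) loops with early return True on [i,j,k,l] == password
def ExponentialTime (password : List Int) : Bool :=
  let _N := password.length
  (PySem.List.pyRange 0 10 1).any fun i =>
    (PySem.List.pyRange 0 10 1).any fun j =>
      (PySem.List.pyRange 0 10 1).any fun k =>
        (PySem.List.pyRange 0 10 1).any fun l =>
          decide ([i, j, k, l] = password)

-- ===== PORT B =====
def ExponentialTime_alt (password : List Int) : Bool :=
  password.length == 4 && password.all fun d => decide (0 ≤ d) && decide (d ≤ 9)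

-- ===== PRECONDITION & SPEC =====
def Spec_ExponentialTime (password : List Int) (out : Bool) : Prop := out = ExponentialTime_alt password
instance (password : List Int) (out : Bool) : Decidable (Spec_ExponentialTime password out) := by unfold Spec_ExponentialTime; infer_instance

-- ===== CLAIM (what is proved, stated in full; the proofs are below) =====
def Claim_equal_ExponentialTime : Prop := ∀ (password : List Int), Dom_ExponentialTime password → Spec_ExponentialTime password (ExponentialTime password)

-- ===== LEMMAS AND PROOFS =====

theorem pvRange10 : PySem.List.pyRange 0 10 1 = [0,1,2,3,4,5,6,7,8,9] := by decide

theorem pvMemRange10 (i : Int) : i ∈ PySem.List.pyRange 0 10 1 ↔ 0 ≤ i ∧ i ≤ 9 := by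
  rw [pvRange10]; simp; omega

theorem pvA_true_iff (password : List Int) :
    ExponentialTime password = true ↔
      ∃ i, (0 ≤ i ∧ i ≤ 9) ∧ ∃ j, (0 ≤ j ∧ j ≤ 9) ∧ ∃ k, (0 ≤ k ∧ k ≤ 9) ∧
        ∃ l, (0 ≤ l ∧ l ≤ 9) ∧ [i, j, k, l] = password := by
  simp only [ExponentialTime, List.any_eq_true, decide_eq_true_iff, pvMemRange10]

theorem pvB_true_iff (password : List Int) :
    ExponentialTime_alt password = true ↔
      password.length = 4 ∧ ∀ d ∈ password, 0 ≤ d ∧ d ≤ 9 := by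
  simp [ExponentialTime_alt]

theorem pvAB (password : List Int) : ExponentialTime password = ExponentialTime_alt password := by
  rw [Bool.eq_iff_iff, pvA_true_iff, pvB_true_iff]
  constructor
  · rintro ⟨i, hi, j, hj, k, hk, l, hl, rfl⟩
    refine ⟨rfl, ?_⟩
    intro d hd
    simp only [List.mem_cons, List.not_mem_nil, or_false] at hd
    rcases hd with rfl | rfl | rfl | rfl <;> assumption
  · rintro ⟨hlen, hall⟩
    match password, hlen with
    | [a, b, c, d], _ =>
      exact ⟨a, hall a (by simp), b, hall b (by simp), c, hall c (by simp),
             d, hall d (by simp), rfl⟩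

-- ===== VERDICT (by name: the statement is the Claim_ definition above) =====
theorem ExponentialTime_spec : Claim_equal_ExponentialTime := by
  intro password _
  unfold Spec_ExponentialTime
  exact pvAB password
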